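-- pv_equiv track=rewrite | github.com/yang-d19/Algo-Problems | tiktok-oa4.py | getMessageStatus
-- ===== SOURCE A (Python) =====
-- def getMessageStatus(timestamps, messages, k):
--     last_msg_time = dict()
--     n = len(timestamps)
--
--     state_result = []
--
--     for i in range(n):
--         curr_time = timestamps[i]
--         curr_msg = messages[i]
--         if curr_msg in last_msg_time:
--             prev_time = last_msg_time[curr_msg]
--             if curr_time - prev_time <= k:
--                 state_result.append("false")
--             else:
--                 state_result.append("true")
--             last_msg_time[curr_msg] = curr_time
--         else:
--             last_msg_time[curr_msg] = curr_time
--             state_result.append("true")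
--
--     return state_result
-- ===== SOURCE B (Python) =====
-- def getMessageStatus(timestamps, messages, k):
--     # Two-phase: group indices by message, then compare each occurrence
--     # with its immediate predecessor within the group.
--     n = len(timestamps)
--     groups = dict()
--     for i in range(n):
--         groups.setdefault(messages[i], []).append(i)
--     result = [""] * n
--     for occ in groups.values():
--         prev = None
--         for i in occ:
--             t = timestamps[i]
--             if prev is not None and t - prev <= k:
--                 result[i] = "false"
--             else:
--                 result[i] = "true"
--             prev = t
--     return result
-- ===== Notes on version B (the rewrite author's own statement) =====
-- stated objective: alternative
-- what changed: A interleaves one pass that maintains a last-seen-time dict; B first groups occurrence indices per message in one dict pass, then walks each group comparing consecutive timestamps and writes results back by original index.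
import Mathlib
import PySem

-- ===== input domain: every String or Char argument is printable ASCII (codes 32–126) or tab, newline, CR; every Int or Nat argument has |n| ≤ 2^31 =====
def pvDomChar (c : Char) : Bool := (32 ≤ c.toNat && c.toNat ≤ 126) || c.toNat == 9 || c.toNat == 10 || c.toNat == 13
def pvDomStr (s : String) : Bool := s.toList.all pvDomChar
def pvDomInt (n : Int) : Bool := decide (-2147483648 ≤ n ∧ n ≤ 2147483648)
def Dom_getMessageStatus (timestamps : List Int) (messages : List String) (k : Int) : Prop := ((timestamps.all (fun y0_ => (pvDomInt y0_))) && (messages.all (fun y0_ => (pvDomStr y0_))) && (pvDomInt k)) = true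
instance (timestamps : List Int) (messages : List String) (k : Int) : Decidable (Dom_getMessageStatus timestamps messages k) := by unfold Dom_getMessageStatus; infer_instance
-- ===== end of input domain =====

-- B replaces A's single interleaved pass with a last-seen-time dict by a two-phase
-- group-by-message pass followed by per-group consecutive-timestamp comparison (alternative decomposition, same cost).


-- ===== PORT A =====
-- Single pass over range(n); dict maps message -> time of its last previous occurrence.
-- messages.getD i "" / timestamps.getD i 0 are exact here: Pre_ guarantees i < length for both lists.
def getMessageStatus (timestamps : List Int) (messages : List String) (k : Int) : List String :=
  let n := timestamps.length
  ((List.range n).foldl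
    (fun (st : PySem.Dict String Int × List String) i =>
      let curr_time := timestamps.getD i 0
      let curr_msg := messages.getD i ""
      match st.1.get? curr_msg with
      | some prev_time =>
          (st.1.insert curr_msg curr_time,
           st.2 ++ [if curr_time - prev_time ≤ k then "false" else "true"])
      | none => (st.1.insert curr_msg curr_time, st.2 ++ ["true"]))
    (PySem.Dict.empty, [])).2

-- ===== PORT B =====
-- inner walk over one group's occurrence indices ('for i in occ: ...'); indices come from
-- range(n) so they are nonnegative and < n = result length: List.set is exact for result[i] = v.
def altWalk (timestamps : List Int) (k : Int) (r : List String) (occ : List Nat) (prev : Option Int) : List String :=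
  match occ with
  | [] => r
  | i :: rest =>
      let t := timestamps.getD i 0
      let v := match prev with
        | some p => if t - p ≤ k then "false" else "true"
        | none => "true"
      altWalk timestamps k (r.set i v) rest (some t)

-- groups.setdefault(messages[i], []).append(i) = Dict.modify with default [] appending i.
def getMessageStatus_alt (timestamps : List Int) (messages : List String) (k : Int) : List String :=
  let n := timestamps.length
  let groups := (List.range n).foldl
    (fun (g : PySem.Dict String (List Nat)) i => g.modify (messages.getD i "") [] (fun l => l ++ [i]))
    PySem.Dict.empty
  let result := List.replicate n ""
  groups.values.foldl (fun r occ => altWalk timestamps k r occ none) result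

-- ===== PRECONDITION & SPEC =====
-- Pre_ excludes exactly the inputs where Python A raises IndexError (messages shorter than
-- timestamps: messages[i] fails for some i < len(timestamps)); B raises there too.
def Pre_getMessageStatus (timestamps : List Int) (messages : List String) (k : Int) : Prop :=
  timestamps.length ≤ messages.length
instance (timestamps : List Int) (messages : List String) (k : Int) : Decidable (Pre_getMessageStatus timestamps messages k) := by unfold Pre_getMessageStatus; infer_instance
def pvWitness_getMessageStatus : List Int × List String × Int := ([1, 3, 10, 12], ["a", "a", "b", "a"], 3)

def Spec_getMessageStatus (timestamps : List Int) (messages : List String) (k : Int) (out : List String) : Prop := out = getMessageStatus_alt timestamps messages k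
instance (timestamps : List Int) (messages : List String) (k : Int) (out : List String) : Decidable (Spec_getMessageStatus timestamps messages k out) := by unfold Spec_getMessageStatus; infer_instance

-- ===== CLAIM (what is proved, stated in full; the proofs are below) =====
def Claim_equal_getMessageStatus : Prop := ∀ (timestamps : List Int) (messages : List String) (k : Int), Dom_getMessageStatus timestamps messages k → Pre_getMessageStatus timestamps messages k → Spec_getMessageStatus timestamps messages k (getMessageStatus timestamps messages k)

-- ===== LEMMAS AND PROOFS =====

def lastOcc (messages : List String) (s : String) (m : Nat) : Option Nat :=
  ((List.range m).filter (fun j => messages.getD j "" == s)).getLast?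

def occs (messages : List String) (n : Nat) (s : String) : List Nat :=
  (List.range n).filter (fun j => messages.getD j "" == s)

def statusAt (timestamps : List Int) (messages : List String) (k : Int) (i : Nat) : String :=
  match lastOcc messages (messages.getD i "") i with
  | none => "true"
  | some j => if timestamps.getD i 0 - timestamps.getD j 0 ≤ k then "false" else "true"

theorem lastOcc_succ (messages : List String) (s : String) (m : Nat) :
    lastOcc messages s (m + 1) =
      if messages.getD m "" == s then some m else lastOcc messages s m := by
  unfold lastOcc
  rw [List.range_succ, List.filter_append]
  simp only [List.filter_cons, List.filter_nil]
  split
  · simp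
  · simp

theorem occs_decomp (messages : List String) (n i : Nat) (hi : i < n)
    (hs : messages.getD i "" == s) :
    occs messages n s = ((List.range i).filter (fun j => messages.getD j "" == s)) ++
      i :: ((List.range' (i+1) (n-(i+1))).filter (fun j => messages.getD j "" == s)) := by
  unfold occs
  have : List.range n = List.range i ++ List.range' i (n - i) := by
    have h := List.range'_append (s := 0) (m := i) (n := n - i) (step := 1)
    simp only [Nat.one_mul, Nat.zero_add] at h
    rw [List.range_eq_range', List.range_eq_range', h]
    congr 1
    omega
  rw [this, List.filter_append]
  have h2 : List.range' i (n - i) = i :: List.range' (i+1) (n - (i+1)) := by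
    have : n - i = (n - (i+1)) + 1 := by omega
    rw [this, List.range'_succ]
  rw [h2, List.filter_cons]
  simp only [List.getD] at hs
  simp [hs]

theorem occs_nodup (messages : List String) (n : Nat) (s : String) : (occs messages n s).Nodup :=
  (List.nodup_range).filter _

theorem split_unique {α : Type} (i : α) :
    ∀ (u u' v v' : List α), i ∉ u → i ∉ u' → u ++ i :: v = u' ++ i :: v' → u = u' ∧ v = v' := by
  intro u
  induction u with
  | nil =>
      intro u' v v' _ hu' h
      cases u' with
      | nil => simpa using h
      | cons a t =>
          simp only [List.nil_append, List.cons_append, List.cons.injEq] at h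
          exact absurd (by simp [h.1] : i ∈ a :: t) hu'
  | cons a t ih =>
      intro u' v v' hu hu' h
      cases u' with
      | nil =>
          simp only [List.cons_append, List.nil_append, List.cons.injEq] at h
          exact absurd (by simp [h.1] : i ∈ a :: t) hu
      | cons b t' =>
          simp only [List.cons_append, List.cons.injEq] at h
          obtain ⟨rfl, h2⟩ := h
          have := ih t' v v' (fun hm => hu (List.mem_cons_of_mem _ hm))
            (fun hm => hu' (List.mem_cons_of_mem _ hm)) h2
          exact ⟨by rw [this.1], this.2⟩

theorem prefix_eq (messages : List String) (n : Nat) (s : String) (l₁ l₂ : List Nat) (i : Nat)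
    (h : occs messages n s = l₁ ++ i :: l₂) :
    (List.range i).filter (fun j => messages.getD j "" == s) = l₁ ∧ i < n ∧ messages.getD i "" = s := by
  have hi : i ∈ occs messages n s := by rw [h]; exact List.mem_append_right _ (List.mem_cons_self)
  have hi' := List.mem_filter.mp hi
  have hin : i < n := List.mem_range.mp hi'.1
  have hbe : messages.getD i "" = s := by have := hi'.2; simpa using this
  have hd := occs_decomp messages n i hin hi'.2
  have hnd := occs_nodup messages n s
  rw [h] at hnd
  have hil1 : i ∉ l₁ := fun hm => (List.disjoint_of_nodup_append hnd) hm List.mem_cons_self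
  have hiA : i ∉ (List.range i).filter (fun j => messages.getD j "" == s) := by
    intro hm
    exact absurd (List.mem_range.mp (List.mem_filter.mp hm).1) (lt_irrefl i)
  have := split_unique i _ l₁ _ l₂ hiA hil1 (hd.symm.trans h)
  exact ⟨this.1, hin, hbe⟩

theorem getD_set_lt (r : List String) (i j : Nat) (v : String) (h : i < r.length) :
    (r.set i v).getD j "" = if j = i then v else r.getD j "" := by
  simp only [List.getD_eq_getElem?_getD, List.getElem?_set]
  by_cases hji : j = i <;> simp_all [eq_comm]

theorem altWalk_spec (timestamps : List Int) (messages : List String) (k : Int) (s : String) :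
    ∀ (l₂ l₁ : List Nat) (r : List String) (prev : Option Int),
      r.length = timestamps.length →
      occs messages timestamps.length s = l₁ ++ l₂ →
      prev = (l₁.getLast?).map (fun j => timestamps.getD j 0) →
      (altWalk timestamps k r l₂ prev).length = r.length ∧
      ∀ j : Nat, (altWalk timestamps k r l₂ prev).getD j "" =
        if j ∈ l₂ then statusAt timestamps messages k j else r.getD j "" := by
  intro l₂
  induction l₂ with
  | nil => intro l₁ r prev _ _ _; simp [altWalk]
  | cons i rest ih =>
      intro l₁ r prev hr hocc hprev
      subst hprev
      obtain ⟨hpre, hin, hmsg⟩ := prefix_eq messages timestamps.length s l₁ rest i hocc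
      have hirest : i ∉ rest := by
        have hnd := occs_nodup messages timestamps.length s
        rw [hocc] at hnd
        exact (List.nodup_cons.mp (hnd.of_append_right)).1
      have hv : (match (l₁.getLast?).map (fun j => timestamps.getD j 0) with
          | some p => if timestamps.getD i 0 - p ≤ k then "false" else "true"
          | none => "true") = statusAt timestamps messages k i := by
        unfold statusAt lastOcc
        rw [hmsg, hpre]
        cases l₁.getLast? <;> rfl
      have step : altWalk timestamps k r (i :: rest) ((l₁.getLast?).map (fun j => timestamps.getD j 0)) =
          altWalk timestamps k (r.set i (statusAt timestamps messages k i)) rest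
            (some (timestamps.getD i 0)) := by
        conv_lhs => simp only [altWalk]
        rw [hv]
      obtain ⟨ihl, ihg⟩ := ih (l₁ ++ [i]) (r.set i (statusAt timestamps messages k i))
        (some (timestamps.getD i 0)) (by simp [hr])
        (by rw [hocc, List.append_assoc]; rfl)
        (by simp)
      rw [step]
      refine ⟨ihl.trans (by simp), fun j => ?_⟩
      rw [ihg j, getD_set_lt r i j _ (by omega)]
      by_cases hj : j ∈ rest
      · simp [hj]
      · by_cases hji : j = i <;> simp [hj, hji]

theorem fold_values (timestamps : List Int) (messages : List String) (k : Int) :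
    ∀ (L : List (String × List Nat)) (S : List String) (r : List String),
      r.length = timestamps.length →
      (∀ p ∈ L, p.2 = occs messages timestamps.length p.1) →
      (∀ j, j < timestamps.length →
        r.getD j "" = if messages.getD j "" ∈ S then statusAt timestamps messages k j else "") →
      (L.foldl (fun r p => altWalk timestamps k r p.2 none) r).length = timestamps.length ∧
      ∀ j, j < timestamps.length →
        (L.foldl (fun r p => altWalk timestamps k r p.2 none) r).getD j "" =
          if messages.getD j "" ∈ S ++ L.map (·.1) then statusAt timestamps messages k j else "" := by
  intro L
  induction L with
  | nil => intro S r hr _ hmodel; simpa [hr] using hmodel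
  | cons p L ih =>
      intro S r hr hL hmodel
      obtain ⟨s, occ⟩ := p
      have hocc : occ = occs messages timestamps.length s := hL _ List.mem_cons_self
      obtain ⟨wl, wg⟩ := altWalk_spec timestamps messages k s occ [] r none hr
        (by rw [hocc]; simp) (by simp)
      simp only [List.foldl_cons]
      obtain ⟨ihl, ihg⟩ := ih (S ++ [s]) (altWalk timestamps k r occ none) (wl.trans hr)
        (fun q hq => hL q (List.mem_cons_of_mem _ hq))
        (by
          intro j hj
          rw [wg j]
          by_cases hjs : messages.getD j "" = s
          · have hjocc : j ∈ occ := by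
              rw [hocc]
              exact List.mem_filter.mpr ⟨List.mem_range.mpr hj, by simp only [beq_iff_eq]; exact hjs⟩
            rw [if_pos hjocc, if_pos (List.mem_append_right _ (by simp only [List.mem_singleton]; exact hjs))]
          · have hjocc : j ∉ occ := by
              rw [hocc]
              intro hm
              exact hjs (by simpa using (List.mem_filter.mp hm).2)
            rw [if_neg hjocc, hmodel j hj]
            exact (if_congr ⟨fun h => (List.mem_append.mp h).resolve_right
                (fun h2 => hjs (List.mem_singleton.mp h2)), fun h => List.mem_append_left _ h⟩
              rfl rfl).symm
        )
      refine ⟨ihl, fun j hj => ?_⟩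
      rw [ihg j hj, List.append_assoc, List.singleton_append]
      rfl

theorem groups_eq_pairs_fold (messages : List String) (n : Nat) :
    (List.range n).foldl (fun (g : PySem.Dict String (List Nat)) i =>
        g.modify (messages.getD i "") [] (fun l => l ++ [i])) PySem.Dict.empty
    = ((List.range n).map (fun i => (messages.getD i "", i))).foldl
        (fun (d : PySem.Dict String (List Nat)) p => d.modify p.1 [] (fun l => l ++ [p.2]))
        PySem.Dict.empty := by
  rw [List.foldl_map]

theorem groups_getD (messages : List String) (n : Nat) (s : String) :
    ((List.range n).foldl (fun (g : PySem.Dict String (List Nat)) i =>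
        g.modify (messages.getD i "") [] (fun l => l ++ [i])) PySem.Dict.empty).getD s []
      = occs messages n s := by
  rw [groups_eq_pairs_fold, PySem.Dict.getD_foldl_modify_append]
  simp [occs, List.filter_map, List.map_map, Function.comp_def]

theorem groups_nodup_keys (messages : List String) (n : Nat) :
    ((List.range n).foldl (fun (g : PySem.Dict String (List Nat)) i =>
        g.modify (messages.getD i "") [] (fun l => l ++ [i])) PySem.Dict.empty).keys.Nodup :=
  PySem.Dict.nodup_keys_foldl_modify_key (List.range n) (fun i => messages.getD i "") []
    (fun _ i => fun l => l ++ [i]) PySem.Dict.empty PySem.Dict.nodup_keys_empty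

theorem getMessageStatus_alt_eq_map (timestamps : List Int) (messages : List String) (k : Int) :
    getMessageStatus_alt timestamps messages k =
      (List.range timestamps.length).map (statusAt timestamps messages k) := by
  unfold getMessageStatus_alt
  simp only [PySem.Dict.values]
  rw [List.foldl_map]
  obtain ⟨hlen, hget⟩ := fold_values timestamps messages k
    ((List.range timestamps.length).foldl (fun (g : PySem.Dict String (List Nat)) i =>
        g.modify (messages.getD i "") [] (fun l => l ++ [i])) PySem.Dict.empty).items
    [] (List.replicate timestamps.length "")
    (by simp)
    (by
      intro p hp
      obtain ⟨ps, pocc⟩ := p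
      have h1 := PySem.Dict.get?_of_mem_items _ hp (groups_nodup_keys messages timestamps.length)
      have h2 := PySem.Dict.getD_of_get?_eq_some _ ([] : List Nat) h1
      rw [← h2, groups_getD]
    )
    (by intro j hj; simp)
  refine List.ext_getElem (by rw [hlen]; simp) ?_
  intro j hj1 hj2
  have hjn : j < timestamps.length := hlen ▸ hj1
  have hcov : messages.getD j "" ∈ ((List.range timestamps.length).foldl
      (fun (g : PySem.Dict String (List Nat)) i =>
        g.modify (messages.getD i "") [] (fun l => l ++ [i])) PySem.Dict.empty).keys := by
    by_contra hnm
    have h0 := (PySem.Dict.get?_eq_none_iff_not_mem_keys _ _).mpr hnm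
    have h1 := PySem.Dict.getD_of_get?_eq_none _ ([] : List Nat) h0
    rw [groups_getD] at h1
    have : j ∈ occs messages timestamps.length (messages.getD j "") :=
      List.mem_filter.mpr ⟨List.mem_range.mpr hjn, by simp⟩
    rw [h1] at this
    exact absurd this (List.not_mem_nil)
  have := hget j hjn
  rw [List.nil_append] at this
  have hkeys : messages.getD j "" ∈ (((List.range timestamps.length).foldl
      (fun (g : PySem.Dict String (List Nat)) i =>
        g.modify (messages.getD i "") [] (fun l => l ++ [i])) PySem.Dict.empty).items.map (fun x => x.1)) := hcov
  rw [if_pos hkeys] at this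
  rw [← List.getD_eq_getElem _ "" hj1, this]
  simp

theorem A_loop (timestamps : List Int) (messages : List String) (k : Int) (m : Nat) :
    (∀ s, ((List.range m).foldl
      (fun (st : PySem.Dict String Int × List String) i =>
        let curr_time := timestamps.getD i 0
        let curr_msg := messages.getD i ""
        match st.1.get? curr_msg with
        | some prev_time =>
            (st.1.insert curr_msg curr_time,
             st.2 ++ [if curr_time - prev_time ≤ k then "false" else "true"])
        | none => (st.1.insert curr_msg curr_time, st.2 ++ ["true"]))
      (PySem.Dict.empty, [])).1.get? s = (lastOcc messages s m).map (fun j => timestamps.getD j 0)) ∧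
    ((List.range m).foldl
      (fun (st : PySem.Dict String Int × List String) i =>
        let curr_time := timestamps.getD i 0
        let curr_msg := messages.getD i ""
        match st.1.get? curr_msg with
        | some prev_time =>
            (st.1.insert curr_msg curr_time,
             st.2 ++ [if curr_time - prev_time ≤ k then "false" else "true"])
        | none => (st.1.insert curr_msg curr_time, st.2 ++ ["true"]))
      (PySem.Dict.empty, [])).2 = (List.range m).map (statusAt timestamps messages k) := by
  induction m with
  | zero => simp [lastOcc]
  | succ m ih =>
      obtain ⟨ih1, ih2⟩ := ih
      rw [List.range_succ, List.foldl_append, List.foldl_cons, List.foldl_nil]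
      simp only []
      rw [ih1 (messages.getD m "")]
      cases h : lastOcc messages (messages.getD m "") m with
      | none =>
          simp only [Option.map_none]
          constructor
          · intro s
            rw [PySem.Dict.get?_insert, ih1 s, lastOcc_succ]
            by_cases hs : messages.getD m "" = s
            · have hs' : messages[m]?.getD "" = s := by
                simpa [List.getD_eq_getElem?_getD] using hs
              simp [hs']
            · have hs' : ¬ messages[m]?.getD "" = s := by
                simpa [List.getD_eq_getElem?_getD] using hs
              have hs2 : ¬ s = messages[m]?.getD "" := fun h2 => hs' h2.symm
              simp [hs', hs2]
          · rw [List.map_append]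
            congr 1
            simp only [List.map_cons, List.map_nil]
            have : statusAt timestamps messages k m = "true" := by
              unfold statusAt
              rw [h]
            rw [this]
      | some j =>
          simp only [Option.map_some]
          constructor
          · intro s
            rw [PySem.Dict.get?_insert, ih1 s, lastOcc_succ]
            by_cases hs : messages.getD m "" = s
            · have hs' : messages[m]?.getD "" = s := by
                simpa [List.getD_eq_getElem?_getD] using hs
              simp [hs']
            · have hs' : ¬ messages[m]?.getD "" = s := by
                simpa [List.getD_eq_getElem?_getD] using hs
              have hs2 : ¬ s = messages[m]?.getD "" := fun h2 => hs' h2.symm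
              simp [hs', hs2]
          · rw [List.map_append]
            congr 1
            simp only [List.map_cons, List.map_nil]
            have : statusAt timestamps messages k m =
                (if timestamps.getD m 0 - timestamps.getD j 0 ≤ k then "false" else "true") := by
              unfold statusAt
              rw [h]
            rw [this]

theorem getMessageStatus_eq_map (timestamps : List Int) (messages : List String) (k : Int) :
    getMessageStatus timestamps messages k =
      (List.range timestamps.length).map (statusAt timestamps messages k) := by
  exact (A_loop timestamps messages k timestamps.length).2

-- ===== VERDICT (by name: the statement is the Claim_ definition above) =====
theorem getMessageStatus_spec : Claim_equal_getMessageStatus := by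
  intro timestamps messages k _ _
  unfold Spec_getMessageStatus
  rw [getMessageStatus_eq_map, getMessageStatus_alt_eq_map]
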